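-- pv_equiv track=rewrite | github.com/liuzhiguang/mycode | python/tileid2level.py | get_level_from_tile_id
-- ===== SOURCE A (Python) =====
-- DEF_NDS_BASE_LEVEL = 16
--
-- def get_level_from_tile_id(tile_id):
--     level = None
--     tile_number = None
--     for i in range(15, -1, -1):
--         judge_lv = (tile_id & (1 << (i + DEF_NDS_BASE_LEVEL)))
--
--         if judge_lv != 0:
--             level = i
--
--             mask = (1 << (level * 2 + 1)) - 1
--             tile_number = tile_id & mask
--             break
--
--     return level, tile_number
-- ===== SOURCE B (Python) =====
-- def get_level_from_tile_id(tile_id):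
--     hi = (tile_id >> 16) & 0xFFFF
--     if hi == 0:
--         return None, None
--     level = hi.bit_length() - 1
--     return level, tile_id & ((1 << (level * 2 + 1)) - 1)
-- ===== Notes on version B (the rewrite author's own statement) =====
-- stated objective: idiomatic
-- what changed: Replaced the explicit descending bit-scan loop over the level bits with a closed form: mask out the high halfword of the tile id and take its bit length minus one as the level.
import Mathlib
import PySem

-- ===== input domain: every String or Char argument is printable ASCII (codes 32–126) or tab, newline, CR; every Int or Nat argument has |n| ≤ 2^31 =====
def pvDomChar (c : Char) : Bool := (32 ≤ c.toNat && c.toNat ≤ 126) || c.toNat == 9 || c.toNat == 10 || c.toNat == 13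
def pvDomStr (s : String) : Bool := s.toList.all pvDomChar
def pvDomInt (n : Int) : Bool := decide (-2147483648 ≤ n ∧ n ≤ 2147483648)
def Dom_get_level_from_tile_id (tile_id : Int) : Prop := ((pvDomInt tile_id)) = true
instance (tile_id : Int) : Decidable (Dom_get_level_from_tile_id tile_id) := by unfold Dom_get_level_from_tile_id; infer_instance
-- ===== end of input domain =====

-- B replaces A's descending bit-scan loop over the level bits with a closed-form bit-length
-- computation on the masked high halfword (idiomatic; same exact return value).

-- ===== PORT A =====
def DEF_NDS_BASE_LEVEL : Int := 16

-- the for-loop over range(15, -1, -1) with break, step for step; '1 << k' is '(1:Int) <<< k.toNat'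
-- (exact for the nonnegative shift amounts the loop produces)
def pvALoop (tile_id : Int) : List Int → Option Int × Option Int
  | [] => (none, none)
  | i :: rest =>
    let judge_lv := PySem.Int.band tile_id ((1 : Int) <<< (i + DEF_NDS_BASE_LEVEL).toNat)
    if judge_lv ≠ 0 then
      let level := i
      let mask := ((1 : Int) <<< (level * 2 + 1).toNat) - 1
      (some level, some (PySem.Int.band tile_id mask))
    else pvALoop tile_id rest

def get_level_from_tile_id (tile_id : Int) : Option Int × Option Int :=
  pvALoop tile_id (PySem.List.pyRange 15 (-1) (-1))

-- ===== PORT B =====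
def get_level_from_tile_id_alt (tile_id : Int) : Option Int × Option Int :=
  let hi := PySem.Int.band (tile_id >>> (16 : Nat)) 0xFFFF
  if hi = 0 then (none, none)
  else
    let level : Int := (PySem.Int.bitLength hi : Int) - 1
    (some level, some (PySem.Int.band tile_id (((1 : Int) <<< (level * 2 + 1).toNat) - 1)))

-- ===== PRECONDITION & SPEC =====
def Spec_get_level_from_tile_id (tile_id : Int) (out : Option Int × Option Int) : Prop := out = get_level_from_tile_id_alt tile_id
instance (tile_id : Int) (out : Option Int × Option Int) : Decidable (Spec_get_level_from_tile_id tile_id out) := by unfold Spec_get_level_from_tile_id; infer_instance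

-- ===== CLAIM (what is proved, stated in full; the proofs are below) =====
def Claim_equal_get_level_from_tile_id : Prop := ∀ (tile_id : Int), Dom_get_level_from_tile_id tile_id → Spec_get_level_from_tile_id tile_id (get_level_from_tile_id tile_id)

-- ===== LEMMAS AND PROOFS =====

-- descending list [n-1, …, 1, 0] as Ints
def pvIList (n : Nat) : List Int := (List.range n).reverse.map (fun j => (j : Int))

theorem pvIList_succ (n : Nat) : pvIList (n + 1) = (n : Int) :: pvIList n := by
  simp [pvIList, List.range_succ]

theorem pvRange_eq : PySem.List.pyRange 15 (-1) (-1) = pvIList 16 := by decide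

theorem pv_negSucc_aux (s : Nat) : (-(Int.negSucc s) - 1).toNat = s := by
  simp [Int.negSucc_eq]

-- band with a power of two reads one bit (Python-exact, incl. negatives)
theorem pv_band_two_pow (a : Int) (k : Nat) :
    PySem.Int.band a ((2 : Int) ^ k) = if a.testBit k then (2 : Int) ^ k else 0 := by
  cases a with
  | ofNat m =>
    have h1 : ((2 : Int) ^ k) = ((2 ^ k : Nat) : Int) := by push_cast; ring
    have h2 : (Int.ofNat m) = ((m : Nat) : Int) := rfl
    rw [h1, h2, PySem.Int.band_natCast, Nat.and_two_pow]
    cases hb : m.testBit k <;> simp [Int.testBit, hb]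
  | negSucc m =>
    have hneg : ¬ (0 : Int) ≤ Int.negSucc m := by omega
    have hmask : (0 : Int) ≤ (2 : Int) ^ k := by positivity
    have htn : ((-(Int.negSucc m) - 1)).toNat = m := pv_negSucc_aux m
    rw [PySem.Int.band, if_neg hneg, if_pos hmask, htn]
    have h3 : ((2 : Int) ^ k).toNat = 2 ^ k := by
      rw [show ((2:Int)^k) = ((2^k : Nat) : Int) by push_cast; ring]; exact Int.toNat_natCast _
    rw [h3, Nat.two_pow_and]
    cases hb : m.testBit k <;> simp [Int.testBit, hb]

-- the high halfword hi = (t >> 16) & 0xFFFF: a Nat below 2^16 whose bits are t's bits 16..31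
theorem pv_hi_spec (t : Int) :
    ∃ h : Nat, PySem.Int.band (t >>> (16 : Nat)) 0xFFFF = (h : Int) ∧ h < 65536 ∧
      ∀ i : Nat, i < 16 → h.testBit i = t.testBit (16 + i) := by
  cases t with
  | ofNat m =>
    refine ⟨(m >>> 16) &&& 65535, ?_, ?_, ?_⟩
    · have h2 : (Int.ofNat m) >>> (16 : Nat) = (((m >>> 16 : Nat)) : Int) := rfl
      rw [h2, show (0xFFFF : Int) = ((65535 : Nat) : Int) by norm_num, PySem.Int.band_natCast]
    · have := Nat.and_le_right (n := m >>> 16) (m := 65535); omega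
    · intro i hi
      rw [Nat.testBit_land, Nat.testBit_shiftRight,
        show (65535 : Nat) = 2 ^ 16 - 1 by norm_num, Nat.testBit_two_pow_sub_one]
      simp [Int.testBit, hi]
  | negSucc m =>
    refine ⟨65535 - (65535 &&& (m >>> 16)), ?_, by omega, ?_⟩
    · have h2 : (Int.negSucc m) >>> (16 : Nat) = Int.negSucc (m >>> 16) := rfl
      have hneg : ¬ (0 : Int) ≤ Int.negSucc (m >>> 16) := by omega
      have hmask : (0 : Int) ≤ (0xFFFF : Int) := by norm_num
      have htn : ((-(Int.negSucc (m >>> 16)) - 1)).toNat = m >>> 16 := pv_negSucc_aux (m >>> 16)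
      rw [h2, PySem.Int.band, if_neg hneg, if_pos hmask, htn]
      rfl
    · intro i hi
      have hx : (65535 &&& (m >>> 16)) < 2 ^ 16 := by
        have := Nat.and_le_left (n := 65535) (m := m >>> 16); omega
      have hrw : 65535 - (65535 &&& (m >>> 16)) = 2 ^ 16 - ((65535 &&& (m >>> 16)) + 1) := by omega
      rw [hrw, Nat.testBit_two_pow_sub_succ hx, Nat.testBit_land, Nat.testBit_shiftRight,
        show (65535 : Nat) = 2 ^ 16 - 1 by norm_num, Nat.testBit_two_pow_sub_one]
      simp [Int.testBit, hi]

-- dropping a leading index whose bit is unset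
theorem pv_loop_step (t : Int) (n : Nat) (hb : t.testBit (16 + n) = false) :
    pvALoop t (pvIList (n + 1)) = pvALoop t (pvIList n) := by
  rw [pvIList_succ, pvALoop]
  have ht : (((n : Int)) + DEF_NDS_BASE_LEVEL).toNat = n + 16 := by
    simp [DEF_NDS_BASE_LEVEL]; omega
  have hsl : (1 : Int) <<< (n + 16) = (2 : Int) ^ (n + 16) := by
    rw [Int.shiftLeft_eq]; ring
  rw [ht, hsl, pv_band_two_pow]
  simp [show (16 + n) = (n + 16) by omega] at hb
  simp [hb]

theorem pv_loop_reduce (t : Int) (k n : Nat)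
    (hb : ∀ i : Nat, n ≤ i → i < n + k → t.testBit (16 + i) = false) :
    pvALoop t (pvIList (n + k)) = pvALoop t (pvIList n) := by
  induction k with
  | zero => rfl
  | succ k ih =>
    have h1 : n + (k + 1) = (n + k) + 1 := by omega
    rw [h1, pv_loop_step t (n + k) (hb (n + k) (by omega) (by omega))]
    exact ih (fun i h1 h2 => hb i h1 (by omega))

-- taking the head whose bit is set
theorem pv_loop_hit (t : Int) (n : Nat) (hb : t.testBit (16 + n) = true) :
    pvALoop t (pvIList (n + 1)) =
      ((some (n : Int)), some (PySem.Int.band t (((1 : Int) <<< (((n : Int)) * 2 + 1).toNat) - 1))) := by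
  rw [pvIList_succ, pvALoop]
  have ht : (((n : Int)) + DEF_NDS_BASE_LEVEL).toNat = n + 16 := by
    simp [DEF_NDS_BASE_LEVEL]; omega
  have hsl : (1 : Int) <<< (n + 16) = (2 : Int) ^ (n + 16) := by
    rw [Int.shiftLeft_eq]; ring
  rw [ht, hsl, pv_band_two_pow]
  simp [show (16 + n) = (n + 16) by omega] at hb
  have hpow : ((2 : Int) ^ (n + 16)) ≠ 0 := by positivity
  simp [hb, hpow]

-- ===== VERDICT (by name: the statement is the Claim_ definition above) =====
theorem get_level_from_tile_id_spec : Claim_equal_get_level_from_tile_id := by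
  intro t _
  unfold Spec_get_level_from_tile_id get_level_from_tile_id get_level_from_tile_id_alt
  obtain ⟨h, hhi, hlt, hbits⟩ := pv_hi_spec t
  rw [pvRange_eq, hhi]
  by_cases hz : h = 0
  · subst hz
    have hall : ∀ i : Nat, 0 ≤ i → i < 0 + 16 → t.testBit (16 + i) = false := by
      intro i _ h2; rw [← hbits i (by omega)]; simp
    have hred := pv_loop_reduce t 16 0 hall
    norm_num at hred
    rw [hred]
    have h0 : pvALoop t (pvIList 0) = (none, none) := rfl
    rw [h0]
    simp
  · -- h ≠ 0: level is bitLength h - 1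
    have hne : ((h : Int)) ≠ 0 := by exact_mod_cast hz
    set bl := PySem.Int.bitLength ((h : Int)) with hbl
    have hub : h < 2 ^ bl := by
      have := PySem.Int.lt_two_pow_bitLength ((h : Int)); simpa using this
    have hlb : 2 ^ (bl - 1) ≤ h := by
      have := PySem.Int.two_pow_bitLength_le ((h : Int)) hne; simpa using this
    have hbl1 : 1 ≤ bl := by
      by_contra hc
      have : bl = 0 := by omega
      rw [this] at hub; omega
    set L := bl - 1 with hL
    have hubL : h < 2 ^ (L + 1) := by
      have : L + 1 = bl := by omega
      rw [this]; exact hub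
    have hL15 : L < 16 := by
      by_contra hc
      have : (2 : Nat) ^ 16 ≤ 2 ^ L := Nat.pow_le_pow_right (by norm_num) (by omega)
      omega
    -- bit L of h is set, bits above L are clear
    have hbitL : h.testBit L = true := by
      have h2 : (2 : Nat) ^ (L + 1) = 2 * 2 ^ L := by ring
      have hdiv : h / 2 ^ L = 1 := by
        rw [h2] at hubL
        exact Nat.div_eq_of_lt_le (by omega) (by omega)
      simp [Nat.testBit, Nat.shiftRight_eq_div_pow, hdiv]
    have hhigh : ∀ j : Nat, L < j → h.testBit j = false := by
      intro j hj
      exact Nat.testBit_eq_false_of_lt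
        (lt_of_lt_of_le hubL (Nat.pow_le_pow_right (by norm_num) (by omega)))
    -- reduce the loop down to index L, then hit
    have hred : pvALoop t (pvIList ((L + 1) + (15 - L))) = pvALoop t (pvIList (L + 1)) := by
      refine pv_loop_reduce t (15 - L) (L + 1) ?_
      intro i h1 h2
      rw [← hbits i (by omega)]
      exact hhigh i (by omega)
    have h16 : (L + 1) + (15 - L) = 16 := by omega
    rw [h16] at hred
    have hbt : t.testBit (16 + L) = true := by rw [← hbits L (by omega)]; exact hbitL
    rw [hred, pv_loop_hit t L hbt]
    -- B side: hi ≠ 0, level = ↑bl - 1 = ↑L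
    have hcastL : (PySem.Int.bitLength ((h : Int)) : Int) - 1 = ((L : Nat) : Int) := by
      rw [← hbl, hL]; push_cast [hbl1]; ring
    simp only [if_neg hne, hcastL]
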